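-- pv_equiv track=rewrite | github.com/KaleF07/2021_ENSF311 | text_statistics.py | count_personal_pronouns
-- ===== SOURCE A (Python) =====
-- def count_personal_pronouns(s):
--     """Count personal pronouns I, my, me, you, we in string s
--
--     The pronouns are counted regardless of capitalization.
--
--     s (str): string to be searched for pronouns
--     returns: (int) Number of personal pronouns
--     """
--
--     #TODO: implement function
--     count = 0
--     s_new = s.lower()
--     s_new = s_new.replace('.',' ')
--     s_new = s_new.replace(',',' ')
--     s_new = s_new.replace('?',' ')
--     s_new = s_new.replace('!',' ')
--
--
--     for word in s_new.split():
--         if (word == 'i') or (word == 'my') or (word == 'me') or (word == 'you') or (word == 'we'):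
--             count += 1
--
--     return count
-- ===== SOURCE B (Python) =====
-- def count_personal_pronouns(s):
--     """Count personal pronouns I, my, me, you, we in string s (case-insensitive)."""
--     pronouns = ('i', 'my', 'me', 'you', 'we')
--     separators = ' \t\n\r\f\v.,?!'
--     count = 0
--     word = ''
--     for ch in s:
--         if ch in separators:
--             if word in pronouns:
--                 count += 1
--             word = ''
--         else:
--             word += ch.lower()
--     if word in pronouns:
--         count += 1
--     return count
-- ===== Notes on version B (the rewrite author's own statement) =====
-- stated objective: alternative
-- what changed: Replaces A's staged pipeline (lowercase whole string, four full-string replace passes, split, then a counting loop over words) with a single character-level pass: a state machine that lowercases each char, flushes the running word buffer at separators (whitespace or .,?!) and bumps the count when the flushed word is one of the five pronouns.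
import Mathlib
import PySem

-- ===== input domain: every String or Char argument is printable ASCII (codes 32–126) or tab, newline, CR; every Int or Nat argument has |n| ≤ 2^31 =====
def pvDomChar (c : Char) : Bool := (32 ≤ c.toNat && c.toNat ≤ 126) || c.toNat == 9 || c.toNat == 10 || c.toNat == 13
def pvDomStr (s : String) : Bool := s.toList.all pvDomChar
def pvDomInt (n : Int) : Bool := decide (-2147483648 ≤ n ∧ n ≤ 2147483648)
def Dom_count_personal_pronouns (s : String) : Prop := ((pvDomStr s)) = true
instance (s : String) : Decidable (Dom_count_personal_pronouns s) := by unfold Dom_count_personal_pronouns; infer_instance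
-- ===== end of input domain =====

-- B is a single-pass character state machine (separator test + per-char lowercasing + running word buffer)
-- instead of A's staged lower/replace×4/split pipeline; alternative decomposition, same cost.

-- ===== PORT A =====
def count_personal_pronouns (s : String) : Int :=
  let s1 := PySem.Str.lower s
  let s2 := PySem.Str.replace s1 "." " "
  let s3 := PySem.Str.replace s2 "," " "
  let s4 := PySem.Str.replace s3 "?" " "
  let s5 := PySem.Str.replace s4 "!" " "
  (PySem.Str.split₀ s5).foldl
    (fun count word =>
      if word == "i" || word == "my" || word == "me" || word == "you" || word == "we"
      then count + 1 else count) 0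

-- ===== PORT B =====
-- Source B's separator string ' \t\n\r\f\v.,?!' as a list of chars ('\f' = \x0C, '\v' = \x0B)
def pvSep (c : Char) : Bool :=
  [' ', '\t', '\n', '\r', '\x0C', '\x0B', '.', ',', '?', '!'].contains c

-- Source B's 'word in pronouns' test (the running word is a list of chars; '' + ch.lower() builds it)
def pvIsPron (w : List Char) : Bool :=
  ["i".toList, "my".toList, "me".toList, "you".toList, "we".toList].contains w

-- Chars.lowerChar is ch.lower() for the ASCII chars of Dom
def count_personal_pronouns_alt (s : String) : Int :=
  let fin := s.toList.foldl
    (fun (st : Int × List Char) ch =>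
      if pvSep ch then (st.1 + (if pvIsPron st.2 then 1 else 0), ([] : List Char))
      else (st.1, st.2 ++ [PySem.Chars.lowerChar ch]))
    (0, ([] : List Char))
  fin.1 + (if pvIsPron fin.2 then 1 else 0)

-- ===== PRECONDITION & SPEC =====
def Spec_count_personal_pronouns (s : String) (out : Int) : Prop := out = count_personal_pronouns_alt s
instance (s : String) (out : Int) : Decidable (Spec_count_personal_pronouns s out) := by unfold Spec_count_personal_pronouns; infer_instance

-- ===== CLAIM (what is proved, stated in full; the proofs are below) =====
def Claim_equal_count_personal_pronouns : Prop := ∀ (s : String), Dom_count_personal_pronouns s → Spec_count_personal_pronouns s (count_personal_pronouns s)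

-- ===== LEMMAS AND PROOFS =====

-- replacing one single char d by ' ' is a per-char map
def pvRep (d : Char) (x : Char) : Char := if x == d then ' ' else x

-- the combined effect of A's normalization on one char
def pvNorm (c : Char) : Char :=
  pvRep '!' (pvRep '?' (pvRep ',' (pvRep '.' (PySem.Chars.lowerChar c))))

theorem replace_go_single (d : Char) (l : List Char) :
    ∀ (fuel : Nat) (acc : List Char), l.length ≤ fuel →
      PySem.Chars.replace.go [d] [' '] fuel l acc = acc.reverse ++ l.map (pvRep d) := by
  induction l with
  | nil => intro fuel acc _; cases fuel <;> simp [PySem.Chars.replace.go]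
  | cons c t ih =>
    intro fuel acc hf
    cases fuel with
    | zero => simp at hf
    | succ f =>
      by_cases hc : d = c
      · subst hc
        simp only [PySem.Chars.replace.go, List.isPrefixOf, BEq.rfl, Bool.true_and, if_true, List.length_cons, List.length_nil,
          List.drop_succ_cons, List.drop_zero, List.reverse_cons, List.reverse_nil,
          List.nil_append]
        rw [ih f ([' '] ++ acc) (by simpa using hf)]
        simp [pvRep]
      · have hpre : ([d].isPrefixOf (c :: t)) = false := by
          simp only [List.isPrefixOf, Bool.and_true]
          exact beq_eq_false_iff_ne.mpr hc
        simp only [PySem.Chars.replace.go, hpre, Bool.false_eq_true, if_false]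
        rw [ih f (c :: acc) (by simpa using Nat.le_of_succ_le_succ hf)]
        simp [pvRep, beq_iff_eq, Ne.symm hc]

theorem replace_single (d : Char) (l : List Char) :
    PySem.Chars.replace l [d] [' '] = l.map (pvRep d) := by
  simp only [PySem.Chars.replace, List.isEmpty_cons, if_false, Bool.false_eq_true]
  exact replace_go_single d l l.length [] le_rfl

-- accumulator lemma for split₀.go
theorem split_go_acc (m : List Char) :
    ∀ (cur : List Char) (acc : List (List Char)),
      PySem.Chars.split₀.go m cur acc = acc.reverse ++ PySem.Chars.split₀.go m cur [] := by
  induction m with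
  | nil =>
    intro cur acc
    by_cases h : cur.isEmpty <;> simp [PySem.Chars.split₀.go, h]
  | cons c t ih =>
    intro cur acc
    by_cases hs : PySem.Chars.isspace c
    · by_cases h : cur.isEmpty
      · simp only [PySem.Chars.split₀.go, hs, h, if_true]
        exact ih [] acc
      · simp only [PySem.Chars.split₀.go, hs, h, if_true, if_false, Bool.false_eq_true]
        rw [ih [] (cur.reverse :: acc), ih [] [cur.reverse]]
        simp
    · simp only [PySem.Chars.split₀.go, hs, Bool.false_eq_true, if_false]
      exact ih (c :: cur) acc

-- char facts ----------------------------------------------------------------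

theorem lowerChar_of_upper (c : Char) (h : PySem.Chars.isupper c = true) :
    97 ≤ (PySem.Chars.lowerChar c).toNat ∧ (PySem.Chars.lowerChar c).toNat ≤ 122 := by
  simp [PySem.Chars.isupper] at h
  have h1 : 65 ≤ c.toNat := Nat.succ_le_of_lt h.1
  have h2 : c.toNat ≤ 90 := h.2
  have hv : (c.toNat + 32).isValidChar := Or.inl (by omega)
  simp [PySem.Chars.lowerChar, PySem.Chars.isupper, h.1, h.2, Char.ofNat, hv]
  omega

theorem ne_of_toNat_ne {c d : Char} (h : c.toNat ≠ d.toNat) : c ≠ d :=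
  fun he => h (congrArg Char.toNat he)

theorem toNat_injective {c d : Char} (h : c.toNat = d.toNat) : c = d :=
  Char.ext (UInt32.toNat_inj.mp h)

-- on non-separator chars A's normalization is exactly per-char lowercasing
theorem pvNorm_of_not_sep (c : Char) (h : pvSep c = false) :
    pvNorm c = PySem.Chars.lowerChar c := by
  simp only [pvSep, List.contains_eq_mem, List.mem_cons, List.not_mem_nil, or_false,
    decide_eq_false_iff_not, not_or] at h
  obtain ⟨h1, h2, h3, h4, h5, h6, h7, h8, h9, h10⟩ := h
  by_cases hu : PySem.Chars.isupper c
  · have hb := lowerChar_of_upper c hu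
    have e1 : ('.' : Char).toNat = 46 := rfl
    have e2 : (',' : Char).toNat = 44 := rfl
    have e3 : ('?' : Char).toNat = 63 := rfl
    have e4 : ('!' : Char).toNat = 33 := rfl
    simp [pvNorm, pvRep, beq_iff_eq,
      ne_of_toNat_ne (show (PySem.Chars.lowerChar c).toNat ≠ ('.' : Char).toNat by omega),
      ne_of_toNat_ne (show (PySem.Chars.lowerChar c).toNat ≠ (',' : Char).toNat by omega),
      ne_of_toNat_ne (show (PySem.Chars.lowerChar c).toNat ≠ ('?' : Char).toNat by omega),
      ne_of_toNat_ne (show (PySem.Chars.lowerChar c).toNat ≠ ('!' : Char).toNat by omega)]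
  · have hl : PySem.Chars.lowerChar c = c := by simp [PySem.Chars.lowerChar, hu]
    simp [pvNorm, pvRep, hl, beq_iff_eq, h7, h8, h9, h10]

-- within Dom, 'isspace after normalization' is exactly Source B's separator test
theorem isspace_pvNorm (c : Char) (hdom : pvDomChar c = true) :
    PySem.Chars.isspace (pvNorm c) = pvSep c := by
  by_cases hs : pvSep c
  · rw [hs]
    simp only [pvSep, List.contains_eq_mem, List.mem_cons, List.not_mem_nil, or_false,
      decide_eq_true_eq] at hs
    rcases hs with h|h|h|h|h|h|h|h|h|h <;> subst h <;> decide
  · have hsf : pvSep c = false := by simpa using hs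
    rw [hsf, pvNorm_of_not_sep c hsf]
    simp only [pvSep, List.contains_eq_mem, List.mem_cons, List.not_mem_nil, or_false,
      decide_eq_false_iff_not, not_or] at hsf
    obtain ⟨h1, h2, h3, h4, h5, h6, h7, h8, h9, h10⟩ := hsf
    simp [pvDomChar] at hdom
    by_cases hu : PySem.Chars.isupper c
    · have hb := lowerChar_of_upper c hu
      simp [PySem.Chars.isspace]; omega
    · have hl : PySem.Chars.lowerChar c = c := by simp [PySem.Chars.lowerChar, hu]
      rw [hl]
      have k1 : c.toNat ≠ 32 := fun h => h1 (toNat_injective h)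
      have k2 : c.toNat ≠ 9 := fun h => h2 (toNat_injective h)
      have k3 : c.toNat ≠ 10 := fun h => h3 (toNat_injective h)
      have k4 : c.toNat ≠ 13 := fun h => h4 (toNat_injective h)
      simp [PySem.Chars.isspace]; omega

-- the state machine over the NORMALIZED chars
def pvMStep (st : Int × List Char) (c : Char) : Int × List Char :=
  if PySem.Chars.isspace c then (st.1 + (if pvIsPron st.2 then 1 else 0), [])
  else (st.1, st.2 ++ [c])

-- the machine computes cnt + (number of pronoun words split₀ finds)
theorem machine_eq_split (m : List Char) :
    ∀ (cur : List Char) (cnt : Int),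
      (m.foldl pvMStep (cnt, cur)).1 + (if pvIsPron (m.foldl pvMStep (cnt, cur)).2 then 1 else 0)
        = cnt + ((PySem.Chars.split₀.go m cur.reverse []).countP pvIsPron : Int) := by
  induction m with
  | nil =>
    intro cur cnt
    by_cases h : cur = []
    · subst h; simp [PySem.Chars.split₀.go, pvIsPron]
    · simp only [List.foldl_nil]
      simp [PySem.Chars.split₀.go, h, List.countP_cons]
  | cons c t ih =>
    intro cur cnt
    rw [List.foldl_cons]
    by_cases hs : PySem.Chars.isspace c
    · have hstep : pvMStep (cnt, cur) c = (cnt + (if pvIsPron cur then 1 else 0), []) := by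
        simp [pvMStep, hs]
      rw [hstep]
      have ih' := ih [] (cnt + (if pvIsPron cur then 1 else 0))
      simp only [List.reverse_nil] at ih'
      by_cases h : cur = []
      · subst h
        rw [show PySem.Chars.split₀.go (c :: t) ([] : List Char).reverse []
              = PySem.Chars.split₀.go t [] [] by simp [PySem.Chars.split₀.go, hs]]
        rw [ih']
        simp [pvIsPron]
      · rw [show PySem.Chars.split₀.go (c :: t) cur.reverse []
              = PySem.Chars.split₀.go t [] [cur.reverse.reverse] by
          simp [PySem.Chars.split₀.go, hs, h]]
        rw [split_go_acc t [] [cur.reverse.reverse]]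
        rw [ih']
        simp [List.countP_cons]
        by_cases hp : pvIsPron cur <;> simp [hp] <;> omega
    · have hstep : pvMStep (cnt, cur) c = (cnt, cur ++ [c]) := by simp [pvMStep, hs]
      rw [hstep, show PySem.Chars.split₀.go (c :: t) cur.reverse []
            = PySem.Chars.split₀.go t (c :: cur.reverse) [] by simp [PySem.Chars.split₀.go, hs],
          show (c :: cur.reverse) = (cur ++ [c]).reverse by simp]
      exact ih (cur ++ [c]) cnt

-- B's raw-char fold is the machine fold over the normalized chars (within Dom)
theorem bfold_eq_machine (l : List Char) :
    ∀ (st : Int × List Char), (∀ c ∈ l, pvDomChar c = true) →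
      l.foldl
        (fun (st : Int × List Char) ch =>
          if pvSep ch then (st.1 + (if pvIsPron st.2 then 1 else 0), ([] : List Char))
          else (st.1, st.2 ++ [PySem.Chars.lowerChar ch])) st
        = (l.map pvNorm).foldl pvMStep st := by
  induction l with
  | nil => intro st _; rfl
  | cons c t ih =>
    intro st hdom
    have hc := hdom c (List.mem_cons_self ..)
    have ht : ∀ x ∈ t, pvDomChar x = true := fun x hx => hdom x (List.mem_cons_of_mem _ hx)
    have hstep :
        (if pvSep c then (st.1 + (if pvIsPron st.2 then 1 else 0), ([] : List Char))
         else (st.1, st.2 ++ [PySem.Chars.lowerChar c])) = pvMStep st (pvNorm c) := by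
      by_cases hs : pvSep c
      · simp [pvMStep, isspace_pvNorm c hc, hs]
      · have hsf : pvSep c = false := by simpa using hs
        have hsp : PySem.Chars.isspace (pvNorm c) = false := by rw [isspace_pvNorm c hc, hsf]
        rw [pvNorm_of_not_sep c hsf] at hsp
        simp [pvMStep, hsp, hsf, pvNorm_of_not_sep c hsf]
    simp only [List.foldl_cons, List.map_cons, hstep]
    exact ih _ ht

-- a pronoun test on a word of split₀ only reads its char list
theorem word_test_eq (w : String) :
    (w == "i" || w == "my" || w == "me" || w == "you" || w == "we") = pvIsPron w.toList := by
  rw [Bool.eq_iff_iff]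
  simp only [pvIsPron, List.contains_eq_mem, List.mem_cons, List.not_mem_nil, or_false,
    Bool.or_eq_true, beq_iff_eq, decide_eq_true_eq, ← String.toList_inj]
  rw [show ("i" : String).toList = ['i'] from rfl, show ("my" : String).toList = ['m','y'] from rfl,
      show ("me" : String).toList = ['m','e'] from rfl,
      show ("you" : String).toList = ['y','o','u'] from rfl,
      show ("we" : String).toList = ['w','e'] from rfl]
  tauto

-- the normalized string of A, char-listed
theorem norm_toList (s : String) :
    (PySem.Str.replace (PySem.Str.replace (PySem.Str.replace (PySem.Str.replace
        (PySem.Str.lower s) "." " ") "," " ") "?" " ") "!" " ").toList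
      = s.toList.map pvNorm := by
  simp only [PySem.Str.toList_replace, PySem.Str.toList_lower, PySem.Chars.lower]
  rw [show ("." : String).toList = ['.'] from rfl, show ("," : String).toList = [','] from rfl,
      show ("?" : String).toList = ['?'] from rfl, show ("!" : String).toList = ['!'] from rfl,
      show (" " : String).toList = [' '] from rfl]
  simp only [replace_single, List.map_map]
  rfl

-- ===== VERDICT (by name: the statement is the Claim_ definition above) =====
theorem count_personal_pronouns_spec : Claim_equal_count_personal_pronouns := by
  intro s hdom
  unfold Spec_count_personal_pronouns count_personal_pronouns count_personal_pronouns_alt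
  rw [PySem.List.foldl_if_add_one]
  have hwords : ∀ (L : List String), (L.countP
      (fun word => word == "i" || word == "my" || word == "me" || word == "you" || word == "we"))
      = (L.map String.toList).countP pvIsPron := by
    intro L
    rw [List.countP_map]
    exact List.countP_congr (fun w _ => by simp [Function.comp, word_test_eq w])
  rw [hwords, PySem.Str.split₀_map_toList, norm_toList]
  have hdl : ∀ c ∈ s.toList, pvDomChar c = true := by
    have := hdom
    unfold Dom_count_personal_pronouns pvDomStr at this
    simpa [List.all_eq_true] using this
  rw [bfold_eq_machine s.toList _ hdl]
  have hm := machine_eq_split (s.toList.map pvNorm) [] 0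
  simp only [List.reverse_nil] at hm
  rw [show PySem.Chars.split₀ (s.toList.map pvNorm)
        = PySem.Chars.split₀.go (s.toList.map pvNorm) [] [] from rfl]
  show (0 : Int) + _
      = ((s.toList.map pvNorm).foldl pvMStep (0, ([] : List Char))).1
        + (if pvIsPron ((s.toList.map pvNorm).foldl pvMStep (0, ([] : List Char))).2 then 1 else 0)
  omega
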